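-- pv_equiv track=rewrite | github.com/fpramunno/ionosphere_diffusion | analyze_sequence_strategy.py | build_proposed_sequences
-- ===== SOURCE A (Python) =====
-- def build_proposed_sequences(timestamps, sequence_length=30, min_center_distance=10):
--     """
--     Proposed approach: Overlapping with minimum center distance, fill missing frames.
--
--     Args:
--         timestamps: List of available timestamps
--         sequence_length: Length of each sequence
--         min_center_distance: Minimum distance between sequence centers (in frames)
--     """
--     sequences = []
--     n = len(timestamps)
--
--     # For each potential starting position
--     i = 0
--     while i + sequence_length <= n:
--         # Calculate center index
--         center_idx = i + sequence_length // 2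
--
--         # Check if we have minimum distance from last sequence's center
--         if not sequences or (center_idx - sequences[-1] >= min_center_distance):
--             sequences.append(center_idx)
--             i += min_center_distance  # Move by minimum distance
--         else:
--             i += 1
--
--     return sequences
-- ===== SOURCE B (Python) =====
-- def build_proposed_sequences(timestamps, sequence_length=30, min_center_distance=10):
--     n = len(timestamps)
--     span = n - sequence_length + 1
--     if span <= 0:
--         return []
--     k = -(-span // min_center_distance)  # ceil(span / min_center_distance)
--     half = sequence_length // 2
--     return [half + j * min_center_distance for j in range(k)]
-- ===== Notes on version B (the rewrite author's own statement) =====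
-- stated objective: simpler
-- what changed: Replaced the stateful while-loop (whose skip branch is dead) by a closed-form ceiling-division count of the evenly spaced centers and a single comprehension over that count.
import Mathlib
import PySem

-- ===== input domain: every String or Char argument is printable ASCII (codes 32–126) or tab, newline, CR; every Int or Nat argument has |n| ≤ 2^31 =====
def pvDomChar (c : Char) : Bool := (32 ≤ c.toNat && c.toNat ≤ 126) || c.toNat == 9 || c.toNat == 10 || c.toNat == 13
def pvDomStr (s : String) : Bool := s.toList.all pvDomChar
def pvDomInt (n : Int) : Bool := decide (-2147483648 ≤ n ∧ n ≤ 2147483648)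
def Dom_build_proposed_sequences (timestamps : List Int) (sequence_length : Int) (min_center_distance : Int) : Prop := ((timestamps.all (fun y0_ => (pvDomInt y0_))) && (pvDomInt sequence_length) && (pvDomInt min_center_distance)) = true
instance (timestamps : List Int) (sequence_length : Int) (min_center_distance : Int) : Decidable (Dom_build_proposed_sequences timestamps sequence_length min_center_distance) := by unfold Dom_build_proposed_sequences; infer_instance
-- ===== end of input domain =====

-- B replaces A's stateful while-loop (whose skip branch is dead) by a closed-form
-- ceiling-division count of the evenly spaced centers; objective: simpler.

-- ===== PORT A =====
-- the while loop of A; fuel only makes it total (inside Pre_ the fuel is never exhausted)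
def pyLoopA (sl mcd n : Int) : Nat → Int → List Int → List Int
  | 0, _, seqs => seqs
  | fuel+1, i, seqs =>
    if i + sl ≤ n then
      let c := i + PySem.Int.floordiv sl 2
      if seqs.isEmpty || decide (mcd ≤ c - seqs.getLastD 0) then
        pyLoopA sl mcd n fuel (i + mcd) (seqs ++ [c])
      else
        pyLoopA sl mcd n fuel (i + 1) seqs
    else seqs

def build_proposed_sequences (timestamps : List Int) (sequence_length : Int) (min_center_distance : Int) : List Int :=
  let n : Int := timestamps.length
  pyLoopA sequence_length min_center_distance n ((n - sequence_length + 1).toNat + 1) 0 []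

-- ===== PORT B =====
def build_proposed_sequences_alt (timestamps : List Int) (sequence_length : Int) (min_center_distance : Int) : List Int :=
  let n : Int := timestamps.length
  let span := n - sequence_length + 1
  if span ≤ 0 then []
  else
    let k := -(PySem.Int.floordiv (-span) min_center_distance)   -- ceil(span / mcd)
    let half := PySem.Int.floordiv sequence_length 2
    (PySem.List.pyRange 0 k 1).map (fun j => half + j * min_center_distance)

-- ===== PRECONDITION & SPEC =====
-- Pre_ excludes only min_center_distance ≤ 0 with n - sequence_length + 1 > 0, where
-- A's while loop never terminates (Python A returns on exactly the inputs admitted here).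
def Pre_build_proposed_sequences (timestamps : List Int) (sequence_length : Int) (min_center_distance : Int) : Prop :=
  1 ≤ min_center_distance ∨ (timestamps.length : Int) - sequence_length + 1 ≤ 0
instance (timestamps : List Int) (sequence_length : Int) (min_center_distance : Int) : Decidable (Pre_build_proposed_sequences timestamps sequence_length min_center_distance) := by unfold Pre_build_proposed_sequences; infer_instance
def pvWitness_build_proposed_sequences : List Int × Int × Int := ([0, 1, 2], 2, 1)

def Spec_build_proposed_sequences (timestamps : List Int) (sequence_length : Int) (min_center_distance : Int) (out : List Int) : Prop := out = build_proposed_sequences_alt timestamps sequence_length min_center_distance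
instance (timestamps : List Int) (sequence_length : Int) (min_center_distance : Int) (out : List Int) : Decidable (Spec_build_proposed_sequences timestamps sequence_length min_center_distance out) := by unfold Spec_build_proposed_sequences; infer_instance

-- ===== CLAIM (what is proved, stated in full; the proofs are below) =====
def Claim_equal_build_proposed_sequences : Prop := ∀ (timestamps : List Int) (sequence_length : Int) (min_center_distance : Int), Dom_build_proposed_sequences timestamps sequence_length min_center_distance → Pre_build_proposed_sequences timestamps sequence_length min_center_distance → Spec_build_proposed_sequences timestamps sequence_length min_center_distance (build_proposed_sequences timestamps sequence_length min_center_distance)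

-- ===== LEMMAS AND PROOFS =====

-- spec of A's loop when the skip branch is dead: the plain stream of centers
def gen (sl mcd n : Int) : Nat → Int → List Int
  | 0, _ => []
  | fuel+1, i => if i + sl ≤ n then (i + PySem.Int.floordiv sl 2) :: gen sl mcd n fuel (i + mcd) else []

-- A's loop only ever takes the append branch, so it equals `seqs ++ gen`
theorem pyLoopA_eq_gen (sl mcd n : Int) (_hm : 1 ≤ mcd) :
    ∀ (fuel : Nat) (i : Int) (seqs : List Int),
      (seqs = [] ∨ seqs.getLast? = some (i - mcd + PySem.Int.floordiv sl 2)) →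
      pyLoopA sl mcd n fuel i seqs = seqs ++ gen sl mcd n fuel i := by
  intro fuel
  induction fuel with
  | zero => intro i seqs _; simp [pyLoopA, gen]
  | succ f ih =>
    intro i seqs hinv
    by_cases h : i + sl ≤ n
    · have hcond : (seqs.isEmpty || decide (mcd ≤ i + PySem.Int.floordiv sl 2 - seqs.getLastD 0)) = true := by
        rcases hinv with h0 | hl
        · simp [h0]
        · have hlast : seqs.getLastD 0 = i - mcd + PySem.Int.floordiv sl 2 := by
            rw [List.getLastD_eq_getLast?, hl]; rfl
          have h2 : decide (mcd ≤ i + PySem.Int.floordiv sl 2 - seqs.getLastD 0) = true :=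
            decide_eq_true (by rw [hlast]; omega)
          rw [h2, Bool.or_true]
      have hinv' : (seqs ++ [i + PySem.Int.floordiv sl 2]) = [] ∨
          (seqs ++ [i + PySem.Int.floordiv sl 2]).getLast? =
            some ((i + mcd) - mcd + PySem.Int.floordiv sl 2) := by
        right
        rw [List.getLast?_concat]
        congr 1
        ring
      simp only [pyLoopA, if_pos h, hcond, if_true]
      rw [ih (i + mcd) _ hinv']
      simp [gen, if_pos h]
    · simp [pyLoopA, gen, if_neg h]

-- the ceiling-division count used by B, shifted to start position i
theorem gen_eq_range (sl mcd n : Int) (hm : 1 ≤ mcd) :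
    ∀ (fuel : Nat) (i : Int), (n - sl + 1) - i ≤ (fuel : Int) →
      gen sl mcd n fuel i =
        (PySem.List.pyRange 0 (-(PySem.Int.floordiv (i - (n - sl + 1)) mcd)) 1).map
          (fun j => (i + PySem.Int.floordiv sl 2) + j * mcd) := by
  intro fuel
  induction fuel with
  | zero =>
    intro i hf
    have h0 : 0 ≤ i - (n - sl + 1) := by omega
    have : 0 ≤ PySem.Int.floordiv (i - (n - sl + 1)) mcd := by
      rw [PySem.Int.floordiv_eq_ediv_of_pos (by omega)]
      exact Int.ediv_nonneg h0 (by omega)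
    rw [PySem.List.pyRange_one_eq_nil (by omega)]
    simp [gen]
  | succ f ih =>
    intro i hf
    by_cases h : i + sl ≤ n
    · have hneg : i - (n - sl + 1) < 0 := by omega
      have hdivneg : PySem.Int.floordiv (i - (n - sl + 1)) mcd < 0 := by
        rw [PySem.Int.floordiv_lt_iff_lt_mul (by omega)]
        omega
      set k := -(PySem.Int.floordiv (i - (n - sl + 1)) mcd) with hk
      have hk1 : 1 ≤ k := by omega
      have hstep : PySem.Int.floordiv ((i + mcd) - (n - sl + 1)) mcd
          = PySem.Int.floordiv (i - (n - sl + 1)) mcd + 1 := by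
        have hpos : (0:Int) < mcd := by omega
        have hq := (PySem.Int.floordiv_eq_iff_of_pos hpos).mp
          (rfl : PySem.Int.floordiv (i - (n - sl + 1)) mcd = PySem.Int.floordiv (i - (n - sl + 1)) mcd)
        apply (PySem.Int.floordiv_eq_iff_of_pos hpos).mpr
        constructor
        · nlinarith [hq.1]
        · nlinarith [hq.2]
      have hrec := ih (i + mcd) (by omega)
      rw [hstep] at hrec
      have hk' : -(PySem.Int.floordiv (i - (n - sl + 1)) mcd + 1) = k - 1 := by omega
      rw [hk'] at hrec
      simp only [gen, if_pos h, hrec]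
      rw [PySem.List.pyRange_one_cons (by omega : (0:Int) < k)]
      rw [PySem.List.pyRange_one, PySem.List.pyRange_one]
      have : (k - 1 - 0).toNat = (k - (0+1)).toNat := by omega
      rw [this]
      simp only [List.map_cons, List.map_map]
      congr 1
      · ring
      · apply List.map_congr_left
        intro t _
        simp [Function.comp]
        ring
    · have h0 : 0 ≤ i - (n - sl + 1) := by omega
      have : 0 ≤ PySem.Int.floordiv (i - (n - sl + 1)) mcd := by
        rw [PySem.Int.floordiv_eq_ediv_of_pos (by omega)]
        exact Int.ediv_nonneg h0 (by omega)
      rw [PySem.List.pyRange_one_eq_nil (by omega)]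
      simp [gen, if_neg h]

-- ===== VERDICT (by name: the statement is the Claim_ definition above) =====
theorem build_proposed_sequences_spec : Claim_equal_build_proposed_sequences := by
  intro ts sl mcd _ hpre
  unfold Spec_build_proposed_sequences build_proposed_sequences build_proposed_sequences_alt
  set n : Int := (ts.length : Int) with hn
  by_cases hspan : n - sl + 1 ≤ 0
  · -- loop condition fails at once; B returns []
    have h0 : (n - sl + 1).toNat = 0 := by omega
    have hc : ¬ ((0:Int) + sl ≤ n) := by omega
    simp only [h0, pyLoopA, if_neg hc, if_pos hspan]
  · have hm : 1 ≤ mcd := by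
      rcases hpre with h | h
      · exact h
      · omega
    rw [pyLoopA_eq_gen sl mcd n hm _ 0 [] (Or.inl rfl)]
    rw [gen_eq_range sl mcd n hm _ 0 (by omega)]
    simp only [if_neg hspan, List.nil_append, zero_sub, zero_add]
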